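-- pv_equiv track=rewrite | github.com/cesung/LeetCode | Daily/2023/2616_minimizeTheMaximumDifferenceOfPairs.py | findPairsWithThreshold
-- ===== SOURCE A (Python) =====
-- from typing import List
--
-- def findPairsWithThreshold(n: int, nums: List[int], threshold: int) -> int:
--     num_pairs = 0
--     idx = 0
--     while idx < n-1:
--         if nums[idx + 1] - nums[idx] <= threshold:
--             num_pairs += 1
--             idx += 1
--         idx += 1
--
--     return num_pairs
-- ===== SOURCE B (Python) =====
-- from typing import List
--
-- def findPairsWithThreshold(n: int, nums: List[int], threshold: int) -> int:
--     prev2 = prev1 = 0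
--     for i in range(1, n):
--         take = prev2 + (1 if nums[i] - nums[i - 1] <= threshold else 0)
--         prev2, prev1 = prev1, max(take, prev1)
--     return prev1
-- ===== Notes on version B (the rewrite author's own statement) =====
-- stated objective: alternative
-- what changed: Replaces the greedy consume-and-skip while-loop (index advancing by 1 or 2) with a two-accumulator dynamic program over adjacent differences (take = prev2 + edge, skip = prev1), which provably computes the same maximum number of non-overlapping within-threshold adjacent pairs.
-- outside the precondition, e.g. on findPairsWithThreshold(3, [0, 0], 0): A returns 1, B raises IndexError
import Mathlib
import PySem

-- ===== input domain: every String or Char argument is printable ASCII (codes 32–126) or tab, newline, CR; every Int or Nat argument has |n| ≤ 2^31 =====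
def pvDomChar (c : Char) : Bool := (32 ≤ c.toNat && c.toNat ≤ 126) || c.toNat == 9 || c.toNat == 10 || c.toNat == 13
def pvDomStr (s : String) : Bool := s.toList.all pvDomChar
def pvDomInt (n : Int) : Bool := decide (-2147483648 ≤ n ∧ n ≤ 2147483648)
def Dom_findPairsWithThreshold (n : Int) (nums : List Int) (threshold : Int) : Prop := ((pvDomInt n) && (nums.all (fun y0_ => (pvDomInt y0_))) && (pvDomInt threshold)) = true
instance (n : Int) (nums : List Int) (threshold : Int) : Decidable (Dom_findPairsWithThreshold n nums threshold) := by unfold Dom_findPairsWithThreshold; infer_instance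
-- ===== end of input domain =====

-- B replaces A's greedy consume-and-skip while-loop by a two-accumulator DP over adjacent
-- differences (objective: alternative algorithm, same cost); same return value on Pre_.

-- ===== PORT A =====
-- while idx < n-1: if nums[idx+1]-nums[idx] <= threshold: num_pairs += 1; idx += 1; idx += 1
def aLoop (n threshold : Int) (nums : List Int) (idx acc : Int) : Int :=
  if _h : idx < n - 1 then
    match PySem.List.pyGet? nums (idx + 1), PySem.List.pyGet? nums idx with
    | some a, some b =>
      if a - b ≤ threshold then aLoop n threshold nums (idx + 1 + 1) (acc + 1)
      else aLoop n threshold nums (idx + 1) acc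
    | _, _ => acc  -- IndexError: excluded by Pre_
  else acc
termination_by (n - 1 - idx).toNat
decreasing_by all_goals omega

def findPairsWithThreshold (n : Int) (nums : List Int) (threshold : Int) : Int :=
  aLoop n threshold nums 0 0

-- ===== PORT B =====
-- loop body of 'for i in range(1, n)': state (prev2, prev1)
def bStep (nums : List Int) (threshold : Int) (s : Int × Int) (i : Int) : Int × Int :=
  match PySem.List.pyGet? nums i, PySem.List.pyGet? nums (i - 1) with
  | some a, some b =>
    (s.2, max (s.1 + (if a - b ≤ threshold then 1 else 0)) s.2)
  | _, _ => s  -- IndexError: excluded by Pre_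

def findPairsWithThreshold_alt (n : Int) (nums : List Int) (threshold : Int) : Int :=
  ((PySem.List.pyRange 1 n 1).foldl (bStep nums threshold) (0, 0)).2

-- ===== PRECONDITION & SPEC =====
-- A indexes nums up to position n-1, so it raises IndexError for many n > len(nums); Pre_
-- excludes all n > len(nums) (on the few such inputs where A's skip happens to stay in
-- bounds and it returns, B raises, so they are outside the claim).
def Pre_findPairsWithThreshold (n : Int) (nums : List Int) (threshold : Int) : Prop :=
  n ≤ (nums.length : Int)
instance (n : Int) (nums : List Int) (threshold : Int) : Decidable (Pre_findPairsWithThreshold n nums threshold) := by unfold Pre_findPairsWithThreshold; infer_instance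

def pvWitness_findPairsWithThreshold : Int × List Int × Int := (3, [1, 2, 10], 4)

def Spec_findPairsWithThreshold (n : Int) (nums : List Int) (threshold : Int) (out : Int) : Prop := out = findPairsWithThreshold_alt n nums threshold
instance (n : Int) (nums : List Int) (threshold : Int) (out : Int) : Decidable (Spec_findPairsWithThreshold n nums threshold out) := by unfold Spec_findPairsWithThreshold; infer_instance

-- ===== CLAIM (what is proved, stated in full; the proofs are below) =====
def Claim_equal_findPairsWithThreshold : Prop := ∀ (n : Int) (nums : List Int) (threshold : Int), Dom_findPairsWithThreshold n nums threshold → Pre_findPairsWithThreshold n nums threshold → Spec_findPairsWithThreshold n nums threshold (findPairsWithThreshold n nums threshold)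

-- ===== LEMMAS AND PROOFS =====

-- 0/1 weight of the edge between adjacent values x, y
def pvE (t x y : Int) : Int := if y - x ≤ t then 1 else 0

-- maximum number of disjoint within-threshold adjacent pairs of the list (path matching)
def pvM (t : Int) : List Int → Int
  | x :: y :: l => max (pvE t x y + pvM t l) (pvM t (y :: l))
  | _ => 0
termination_by l => l.length

-- B's fold, rewritten as structural recursion over the suffix with the previous element x
def pvRun (t x : Int) (s : Int × Int) : List Int → Int × Int
  | [] => s
  | y :: l => pvRun t y (s.2, max (s.1 + pvE t x y) s.2) l

theorem pvE_cases (t x y : Int) : pvE t x y = 0 ∨ pvE t x y = 1 := by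
  unfold pvE; split <;> simp

theorem pvM_nil (t : Int) : pvM t [] = 0 := by rw [pvM]; simp

theorem pvM_one (t x : Int) : pvM t [x] = 0 := by rw [pvM]; simp

theorem pvM_cons2 (t x y : Int) (l : List Int) :
    pvM t (x :: y :: l) = max (pvE t x y + pvM t l) (pvM t (y :: l)) := by rw [pvM]

theorem pvM_short (t : Int) (l : List Int) (h : l.length ≤ 1) : pvM t l = 0 := by
  match l with
  | [] => exact pvM_nil t
  | [x] => exact pvM_one t x
  | x :: y :: l => simp at h

theorem pvM_cons_ge (t y : Int) (l : List Int) : pvM t l ≤ pvM t (y :: l) := by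
  match l with
  | [] => simp [pvM_nil, pvM_one]
  | z :: l' => rw [pvM_cons2]; exact le_max_right _ _

theorem pvM_cons_le (t y : Int) (l : List Int) : pvM t (y :: l) ≤ pvM t l + 1 := by
  match l with
  | [] => simp [pvM_nil, pvM_one]
  | z :: l' =>
    rw [pvM_cons2]
    have h1 := pvM_cons_ge t z l'
    rcases pvE_cases t y z with h | h <;> omega

-- A's greedy loop computes acc + pvM of the untouched suffix of nums[:n]
theorem aLoop_eq (n threshold : Int) (nums : List Int) (hn : n ≤ (nums.length : Int)) :
    ∀ (k : Nat) (idx acc : Int), (n - 1 - idx).toNat ≤ k → 0 ≤ idx →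
      aLoop n threshold nums idx acc = acc + pvM threshold ((nums.take n.toNat).drop idx.toNat) := by
  intro k
  induction k with
  | zero =>
    intro idx acc hk hi
    have hge : ¬ idx < n - 1 := by omega
    rw [aLoop]; simp only [hge, dite_false]
    have hlen : ((nums.take n.toNat).drop idx.toNat).length ≤ 1 := by
      simp only [List.length_drop, List.length_take]; omega
    rw [pvM_short _ _ hlen]; ring
  | succ k ih =>
    intro idx acc hk hi
    by_cases hlt : idx < n - 1
    · have hidx : idx.toNat < nums.length := by omega
      have hidx1 : idx.toNat + 1 < nums.length := by omega
      have hg1 : PySem.List.pyGet? nums (idx + 1) = some nums[idx.toNat + 1] := by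
        rw [PySem.List.pyGet?_of_nonneg nums (by omega : (0:Int) ≤ idx + 1)]
        have h : (idx + 1).toNat = idx.toNat + 1 := by omega
        rw [h, List.getElem?_eq_getElem hidx1]
      have hg0 : PySem.List.pyGet? nums idx = some nums[idx.toNat] := by
        rw [PySem.List.pyGet?_of_nonneg nums hi, List.getElem?_eq_getElem hidx]
      have hLlen : idx.toNat + 1 < (nums.take n.toNat).length := by
        simp only [List.length_take]; omega
      have hdrop : (nums.take n.toNat).drop idx.toNat
          = nums[idx.toNat] :: nums[idx.toNat + 1] :: (nums.take n.toNat).drop (idx.toNat + 2) := by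
        rw [List.drop_eq_getElem_cons (l := nums.take n.toNat) (by omega),
            List.drop_eq_getElem_cons (l := nums.take n.toNat) hLlen]
        rw [List.getElem_take, List.getElem_take]
      have hdrop1 : (nums.take n.toNat).drop (idx.toNat + 1)
          = nums[idx.toNat + 1] :: (nums.take n.toNat).drop (idx.toNat + 2) := by
        rw [List.drop_eq_getElem_cons (l := nums.take n.toNat) hLlen, List.getElem_take]
      rw [aLoop]; simp only [hlt, dite_true, hg1, hg0]
      rw [hdrop, pvM_cons2]
      by_cases hc : nums[idx.toNat + 1] - nums[idx.toNat] ≤ threshold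
      · simp only [hc, if_true]
        rw [ih (idx + 1 + 1) (acc + 1) (by omega) (by omega)]
        have h2 : (idx + 1 + 1).toNat = idx.toNat + 2 := by omega
        rw [h2]
        have he : pvE threshold nums[idx.toNat] nums[idx.toNat + 1] = 1 := by
          unfold pvE; simp [hc]
        have hle := pvM_cons_le threshold nums[idx.toNat + 1] ((nums.take n.toNat).drop (idx.toNat + 2))
        rw [he]
        omega
      · simp only [hc, if_false]
        rw [ih (idx + 1) acc (by omega) (by omega)]
        have h1 : (idx + 1).toNat = idx.toNat + 1 := by omega
        rw [h1, hdrop1]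
        have he : pvE threshold nums[idx.toNat] nums[idx.toNat + 1] = 0 := by
          unfold pvE; simp [hc]
        have hge := pvM_cons_ge threshold nums[idx.toNat + 1] ((nums.take n.toNat).drop (idx.toNat + 2))
        rw [he]
        omega
    · rw [aLoop]; simp only [hlt, dite_false]
      have hlen : ((nums.take n.toNat).drop idx.toNat).length ≤ 1 := by
        simp only [List.length_drop, List.length_take]; omega
      rw [pvM_short _ _ hlen]; ring

-- B's foldl over range(k, n) equals pvRun over the matching suffix of nums[:n]
theorem bFold_eq (n threshold : Int) (nums : List Int) (hn : n ≤ (nums.length : Int)) :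
    ∀ (m : Nat) (k : Int) (s : Int × Int), (n - k).toNat ≤ m → 1 ≤ k →
      ∀ (hkl : k.toNat - 1 < nums.length),
      (PySem.List.pyRange k n 1).foldl (bStep nums threshold) s
        = pvRun threshold (nums[k.toNat - 1]'hkl) s ((nums.take n.toNat).drop k.toNat) := by
  intro m
  induction m with
  | zero =>
    intro k s hm hk hkl
    rw [PySem.List.pyRange_one_eq_nil (by omega)]
    have h : (nums.take n.toNat).drop k.toNat = [] := by
      apply List.drop_eq_nil_iff.mpr
      rw [List.length_take]; omega
    rw [h]; rfl
  | succ m ih =>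
    intro k s hm hk hkl
    by_cases hlt : k < n
    · rw [PySem.List.pyRange_one_cons hlt]
      have hkn : k.toNat < nums.length := by omega
      have hg : PySem.List.pyGet? nums k = some nums[k.toNat] := by
        rw [PySem.List.pyGet?_of_nonneg nums (by omega : (0:Int) ≤ k), List.getElem?_eq_getElem hkn]
      have hg' : PySem.List.pyGet? nums (k - 1) = some nums[k.toNat - 1] := by
        rw [PySem.List.pyGet?_of_nonneg nums (by omega : (0:Int) ≤ k - 1)]
        have h : (k - 1).toNat = k.toNat - 1 := by omega
        rw [h, List.getElem?_eq_getElem hkl]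
      have hLk : k.toNat < (nums.take n.toNat).length := by
        simp only [List.length_take]; omega
      have hdrop : (nums.take n.toNat).drop k.toNat
          = nums[k.toNat] :: (nums.take n.toNat).drop (k.toNat + 1) := by
        rw [List.drop_eq_getElem_cons (l := nums.take n.toNat) hLk, List.getElem_take]
      simp only [List.foldl_cons]
      rw [ih (k + 1) (bStep nums threshold s k) (by omega) (by omega) (by omega)]
      have h1 : (k + 1).toNat - 1 = k.toNat := by omega
      have h2 : (k + 1).toNat = k.toNat + 1 := by omega
      simp only [h2, Nat.add_sub_cancel]
      rw [hdrop]
      show _ = pvRun threshold nums[k.toNat] _ _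
      congr 1
      unfold bStep; rw [hg, hg']
      unfold pvE; rfl
    · rw [PySem.List.pyRange_one_eq_nil (by omega)]
      have h : (nums.take n.toNat).drop k.toNat = [] := by
        apply List.drop_eq_nil_iff.mpr
        rw [List.length_take]; omega
      rw [h]; rfl

-- the DP's prev1 is the maximum matching (of the suffix, with / without the carried element)
theorem pvRun_eq_pvM (t : Int) :
    ∀ (l : List Int) (x p2 p1 : Int), p2 ≤ p1 → p1 ≤ p2 + 1 →
      (pvRun t x (p2, p1) l).2 = max (p1 + pvM t l) (p2 + pvM t (x :: l)) := by
  intro l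
  induction l with
  | nil =>
    intro x p2 p1 h1 h2
    show p1 = max (p1 + pvM t []) (p2 + pvM t [x])
    rw [pvM_nil, pvM_one]; omega
  | cons y l' ih =>
    intro x p2 p1 h1 h2
    show (pvRun t y (p1, max (p2 + pvE t x y) p1) l').2 = _
    have he := pvE_cases t x y
    rw [ih y p1 (max (p2 + pvE t x y) p1) (le_max_right _ _) (by rcases he with h | h <;> omega)]
    rw [pvM_cons2]
    have hM1 := pvM_cons_ge t y l'
    rcases he with h | h <;> rw [h] <;> omega

-- ===== VERDICT (by name: the statement is the Claim_ definition above) =====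
theorem findPairsWithThreshold_spec : Claim_equal_findPairsWithThreshold := by
  intro n nums threshold _ hPre
  unfold Spec_findPairsWithThreshold findPairsWithThreshold findPairsWithThreshold_alt
  have hn : n ≤ (nums.length : Int) := hPre
  rw [aLoop_eq n threshold nums hn (n - 1 - 0).toNat 0 0 le_rfl le_rfl]
  simp only [Int.toNat_zero, List.drop_zero, zero_add]
  by_cases h2 : n < 2
  · rw [PySem.List.pyRange_one_eq_nil (by omega)]
    have h : (nums.take n.toNat).length ≤ 1 := by simp only [List.length_take]; omega
    rw [pvM_short _ _ h]; rfl
  · have h0 : (0 : Nat) < nums.length := by omega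
    rw [bFold_eq n threshold nums hn (n - 1).toNat 1 (0, 0) (by omega) le_rfl (by omega)]
    have h1' : (1 : Int).toNat = 1 := by rfl
    simp only [h1', Nat.sub_self]
    rw [pvRun_eq_pvM threshold _ _ 0 0 le_rfl (by omega)]
    have hL0 : (0 : Nat) < (nums.take n.toNat).length := by simp only [List.length_take]; omega
    have hdrop : nums.take n.toNat = nums[0] :: (nums.take n.toNat).drop 1 := by
      have := List.drop_eq_getElem_cons (l := nums.take n.toNat) (i := 0) hL0
      simpa [List.getElem_take] using this
    have hge := pvM_cons_ge threshold (nums[0]) ((nums.take n.toNat).drop 1)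
    conv_lhs => rw [hdrop]
    omega
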